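-- pv_equiv track=rewrite | github.com/SanjoSolutions/go | main.py | determine_surrounded_by_by_move
-- ===== SOURCE A (Python) =====
-- from enum import IntEnum
--
-- NUMBER_OF_ROWS = 3
--
-- NUMBER_OF_COLUMNS = 3
--
-- class Player(IntEnum):
--     Black = 1
--     White = 2
--
-- def determine_surrounded_by_by_move(board, position, move):
--     number_of_rows = len(board)
--     number_of_columns = len(board[0])
--     for player in Player:
--         for from_row in range(-1, number_of_rows):
--             for from_column in range(-1, number_of_columns):
--                 for height in range(3, number_of_rows - from_row + 1):
--                     for width in range(3, number_of_columns - from_column + 1):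
--                         area = (from_row, from_column, width, height)
--                         if is_position_in_area(position, area):
--                             if is_surrounded_by_area(board, position, player, area):
--                                 return player
--     return None
--
-- def is_position_in_area(position, area):
--     row, column = position
--     from_row, from_column, width, height = area
--     return (
--         from_row <= row <= from_row + width - 1 and
--         from_column <= column <= from_column + height - 1
--     )
--
-- def is_surrounded_by_area(board, position, player, area):
--     from_row, from_column, width, height = area
--
--     row, column = position
--     if not (
--         from_row < row < from_row + height - 1 and
--         from_column < column < from_column + width - 1
--     ):
--         return False
--
--     surrounder_positions = []
--
--     row = from_row
--     if row >= 0: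
--         for column in range(from_column + 1, from_column + width - 1):
--             surrounder_positions.append((row, column))
--
--     column = from_column + width - 1
--     if column <= NUMBER_OF_COLUMNS - 1:
--         for row in range(from_row + 1, from_row + height - 1):
--             surrounder_positions.append((row, column))
--
--     row = from_row + height - 1
--     if row <= NUMBER_OF_ROWS - 1:
--         for column in range(from_column + 1, from_column + width - 1):
--             surrounder_positions.append((row, column))
--
--     column = from_column
--     if column >= 0:
--         for row in range(from_row + 1, from_row + height - 1):
--             surrounder_positions.append((row, column))
--
--     return all(
--         board[position[0]][position[1]] == player
--         for position
--         in surrounder_positions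
--     )
-- ===== SOURCE B (Python) =====
-- NUMBER_OF_ROWS = 3
-- NUMBER_OF_COLUMNS = 3
--
-- def determine_surrounded_by_by_move(board, position, move):
--     R = len(board)
--     C = len(board[0])
--     pr, pc = position
--     for player in (1, 2):
--         # prefix[r][c] = number of cells equal to player in board[r][0:c]
--         rowpre = []
--         for row in board:
--             pre = [0]
--             for x in row:
--                 pre.append(pre[-1] + (1 if x == player else 0))
--             rowpre.append(pre)
--         colpre = []
--         for c in range(C):
--             pre = [0]
--             for r in range(R):
--                 pre.append(pre[-1] + (1 if board[r][c] == player else 0))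
--             colpre.append(pre)
--
--         def row_all(r, a, b):   # board[r][a:b] all == player, O(1)
--             return rowpre[r][b] - rowpre[r][a] == b - a
--
--         def col_all(c, a, b):   # board[a:b][c] all == player, O(1)
--             return colpre[c][b] - colpre[c][a] == b - a
--
--         found = False
--         for fr in range(-1, R):
--             if found:
--                 break
--             for fc in range(-1, C):
--                 if found:
--                     break
--                 for h in range(3, R - fr + 1):
--                     if found:
--                         break
--                     for w in range(3, C - fc + 1):
--                         if (fr <= pr <= fr + w - 1 and fc <= pc <= fc + h - 1
--                                 and fr < pr < fr + h - 1 and fc < pc < fc + w - 1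
--                                 and (fr < 0 or row_all(fr, fc + 1, fc + w - 1))
--                                 and (fc + w - 1 > NUMBER_OF_COLUMNS - 1
--                                      or col_all(fc + w - 1, fr + 1, fr + h - 1))
--                                 and (fr + h - 1 > NUMBER_OF_ROWS - 1
--                                      or row_all(fr + h - 1, fc + 1, fc + w - 1))
--                                 and (fc < 0 or col_all(fc, fr + 1, fr + h - 1))):
--                             found = True
--                             break
--         if found:
--             return player
--     return None
-- ===== Notes on version B (the rewrite author's own statement) =====
-- stated objective: alternative
-- what changed: B precomputes per-player row/column prefix-count tables once so each rectangle-border test is O(1) arithmetic instead of A's building and scanning an O(w+h) list of border positions per rectangle.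
-- outside the precondition, e.g. on determine_surrounded_by_by_move([[0, 0], [0]], (5, 5), 0): A returns None, B raises IndexError
import Mathlib
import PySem

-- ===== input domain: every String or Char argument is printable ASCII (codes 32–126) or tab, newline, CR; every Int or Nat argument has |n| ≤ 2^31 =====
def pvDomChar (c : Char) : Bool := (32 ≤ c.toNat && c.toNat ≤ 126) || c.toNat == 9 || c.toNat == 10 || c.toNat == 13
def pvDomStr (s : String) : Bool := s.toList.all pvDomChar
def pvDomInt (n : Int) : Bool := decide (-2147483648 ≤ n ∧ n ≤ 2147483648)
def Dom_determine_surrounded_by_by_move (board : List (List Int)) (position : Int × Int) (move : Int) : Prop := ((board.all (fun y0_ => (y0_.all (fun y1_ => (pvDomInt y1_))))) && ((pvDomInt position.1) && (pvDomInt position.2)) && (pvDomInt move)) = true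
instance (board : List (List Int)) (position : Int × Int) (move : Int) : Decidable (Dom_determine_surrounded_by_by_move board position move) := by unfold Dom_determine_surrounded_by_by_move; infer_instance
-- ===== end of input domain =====

-- B replaces A's per-rectangle O(w+h) border scans by per-player prefix-count tables giving
-- O(1) border tests (equivalence of the RETURN value; neither program mutates its arguments).

-- ===== PORT A =====
-- is_position_in_area(position, area) with area = (from_row, from_column, width, height)
def pvInArea (position : Int × Int) (fr fc w h : Int) : Bool :=
  decide (fr ≤ position.1 ∧ position.1 ≤ fr + w - 1) &&
  decide (fc ≤ position.2 ∧ position.2 ≤ fc + h - 1)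

-- is_surrounded_by_area; NUMBER_OF_COLUMNS - 1 = 2 and NUMBER_OF_ROWS - 1 = 2 (module constants)
def pvSurrounded (board : List (List Int)) (position : Int × Int) (player fr fc w h : Int) : Bool :=
  if !(decide (fr < position.1 ∧ position.1 < fr + h - 1) &&
       decide (fc < position.2 ∧ position.2 < fc + w - 1)) then false
  else
    let s1 : List (Int × Int) :=
      if fr ≥ 0 then (PySem.List.pyRange (fc+1) (fc+w-1) 1).map (fun c => (fr, c)) else []
    let s2 := s1 ++
      (if fc + w - 1 ≤ 2 then (PySem.List.pyRange (fr+1) (fr+h-1) 1).map (fun r => (r, fc+w-1)) else [])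
    let s3 := s2 ++
      (if fr + h - 1 ≤ 2 then (PySem.List.pyRange (fc+1) (fc+w-1) 1).map (fun c => (fr+h-1, c)) else [])
    let s4 := s3 ++
      (if fc ≥ 0 then (PySem.List.pyRange (fr+1) (fr+h-1) 1).map (fun r => (r, fc)) else [])
    s4.all (fun q => PySem.List.pyGetD (PySem.List.pyGetD board q.1 []) q.2 0 == player)

def determine_surrounded_by_by_move (board : List (List Int)) (position : Int × Int) (move : Int) : Option Int :=
  let R : Int := board.length
  let C : Int := (PySem.List.pyGetD board 0 []).length
  ([1, 2] : List Int).find? (fun player =>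
    (PySem.List.pyRange (-1) R 1).any (fun fr =>
      (PySem.List.pyRange (-1) C 1).any (fun fc =>
        (PySem.List.pyRange 3 (R - fr + 1) 1).any (fun h =>
          (PySem.List.pyRange 3 (C - fc + 1) 1).any (fun w =>
            pvInArea position fr fc w h && pvSurrounded board position player fr fc w h)))))

-- ===== PORT B =====
-- prefix-count list of a row: pre[i] = acc + #{ j < i | xs[j] = p }
def pvPrefix (p : Int) (acc : Int) : List Int → List Int
  | [] => [acc]
  | x :: xs => acc :: pvPrefix p (acc + (if x == p then 1 else 0)) xs

-- all of xs[a:b] equal p, read off the prefix list in O(1)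
def pvSegOk (pre : List Int) (a b : Int) : Bool :=
  PySem.List.pyGetD pre b 0 - PySem.List.pyGetD pre a 0 == b - a

def pvCheckB (rowpre colpre : List (List Int)) (pr pc fr fc w h : Int) : Bool :=
  decide (fr ≤ pr ∧ pr ≤ fr + w - 1 ∧ fc ≤ pc ∧ pc ≤ fc + h - 1
          ∧ fr < pr ∧ pr < fr + h - 1 ∧ fc < pc ∧ pc < fc + w - 1)
  && (decide (fr < 0) || pvSegOk (PySem.List.pyGetD rowpre fr []) (fc+1) (fc+w-1))
  && (decide (fc + w - 1 > 2) || pvSegOk (PySem.List.pyGetD colpre (fc+w-1) []) (fr+1) (fr+h-1))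
  && (decide (fr + h - 1 > 2) || pvSegOk (PySem.List.pyGetD rowpre (fr+h-1) []) (fc+1) (fc+w-1))
  && (decide (fc < 0) || pvSegOk (PySem.List.pyGetD colpre fc []) (fr+1) (fr+h-1))

def determine_surrounded_by_by_move_alt (board : List (List Int)) (position : Int × Int) (move : Int) : Option Int :=
  let R : Int := board.length
  let C : Int := (PySem.List.pyGetD board 0 []).length
  ([1, 2] : List Int).find? (fun player =>
    let rowpre := board.map (pvPrefix player 0)
    let colpre := (PySem.List.pyRange 0 C 1).map (fun c =>
      pvPrefix player 0 ((PySem.List.pyRange 0 R 1).map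
        (fun r => PySem.List.pyGetD (PySem.List.pyGetD board r []) c 0)))
    (PySem.List.pyRange (-1) R 1).any (fun fr =>
      (PySem.List.pyRange (-1) C 1).any (fun fc =>
        (PySem.List.pyRange 3 (R - fr + 1) 1).any (fun h =>
          (PySem.List.pyRange 3 (C - fc + 1) 1).any (fun w =>
            pvCheckB rowpre colpre position.1 position.2 fr fc w h)))))

-- ===== PRECONDITION & SPEC =====
-- Pre_ excludes the empty board (board[0] raises IndexError) and boards whose row 0 is longer
-- than some later row, on which A can raise IndexError while scanning a border; on such ragged
-- boards where the position lies in no rectangle A happens to return None without the bad access.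
def Pre_determine_surrounded_by_by_move (board : List (List Int)) (position : Int × Int) (move : Int) : Prop :=
  board ≠ [] ∧ ∀ row ∈ board, (PySem.List.pyGetD board 0 []).length ≤ row.length
instance (board : List (List Int)) (position : Int × Int) (move : Int) : Decidable (Pre_determine_surrounded_by_by_move board position move) := by unfold Pre_determine_surrounded_by_by_move; infer_instance

def pvWitness_determine_surrounded_by_by_move : List (List Int) × (Int × Int) × Int :=
  ([[1, 1, 1], [1, 2, 1], [1, 1, 1]], (1, 1), 0)

def Spec_determine_surrounded_by_by_move (board : List (List Int)) (position : Int × Int) (move : Int) (out : Option Int) : Prop := out = determine_surrounded_by_by_move_alt board position move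
instance (board : List (List Int)) (position : Int × Int) (move : Int) (out : Option Int) : Decidable (Spec_determine_surrounded_by_by_move board position move out) := by unfold Spec_determine_surrounded_by_by_move; infer_instance

-- ===== CLAIM (what is proved, stated in full; the proofs are below) =====
def Claim_equal_determine_surrounded_by_by_move : Prop := ∀ (board : List (List Int)) (position : Int × Int) (move : Int), Dom_determine_surrounded_by_by_move board position move → Pre_determine_surrounded_by_by_move board position move → Spec_determine_surrounded_by_by_move board position move (determine_surrounded_by_by_move board position move)

-- ===== LEMMAS AND PROOFS =====

theorem pvAllCongr {α : Type} {l : List α} {f g : α → Bool} (h : ∀ x ∈ l, f x = g x) :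
    l.all f = l.all g := by
  rw [List.all_eq_not_any_not, List.all_eq_not_any_not,
    PySem.List.any_congr_mem (g := fun x => !g x) (fun x hx => by rw [h x hx])]

theorem pvPrefix_getD (p : Int) (xs : List Int) (acc : Int) (i : Nat) (hi : i ≤ xs.length) :
    PySem.List.pyGetD (pvPrefix p acc xs) (i : Int) 0
      = acc + ((xs.take i).countP (fun x => x == p) : Int) := by
  induction xs generalizing acc i with
  | nil =>
    have : i = 0 := by simpa using hi
    subst this
    simp [pvPrefix]
  | cons x xs ih =>
    cases i with
    | zero => simp [pvPrefix]
    | succ j =>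
      have hj : j ≤ xs.length := by simpa using hi
      have h := ih (acc + (if x == p then 1 else 0)) j hj
      rw [pvPrefix]
      simp only [PySem.List.pyGetD_natCast, List.getD_cons_succ,
        List.take_succ_cons, List.countP_cons] at h ⊢
      rw [h]
      by_cases hx : x == p <;> simp [hx] <;> push_cast <;> ring

theorem pvSegOk_eq (p : Int) (xs : List Int) (a b : Int)
    (h0 : 0 ≤ a) (hab : a ≤ b) (hb : b ≤ (xs.length : Int)) :
    pvSegOk (pvPrefix p 0 xs) a b
      = (PySem.List.pyRange a b 1).all (fun c => PySem.List.pyGetD xs c 0 == p) := by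
  obtain ⟨i, rfl⟩ : ∃ i : Nat, a = (i : Int) := ⟨a.toNat, (Int.toNat_of_nonneg h0).symm⟩
  obtain ⟨j, rfl⟩ : ∃ j : Nat, b = (j : Int) := ⟨b.toNat, (Int.toNat_of_nonneg (le_trans h0 hab)).symm⟩
  have hij : i ≤ j := by exact_mod_cast hab
  have hjl : j ≤ xs.length := by exact_mod_cast hb
  set seg := (xs.take j).drop i with hseg
  have hsplit : xs.take j = xs.take i ++ seg := by
    have h := List.take_append_drop i (xs.take j)
    rw [List.take_take, min_eq_left hij] at h
    exact h.symm
  have hlen : seg.length = j - i := by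
    simp [hseg, hjl]
  have hget : ∀ (m : Nat) (hm : m < seg.length), seg[m] = xs[i + m]'(by omega) := by
    intro m hm
    simp only [hseg]
    rw [List.getElem_drop, List.getElem_take]
  rw [pvSegOk, pvPrefix_getD p xs 0 i (le_trans hij hjl), pvPrefix_getD p xs 0 j hjl,
    hsplit, List.countP_append]
  rw [Bool.eq_iff_iff]
  simp only [beq_iff_eq, List.all_eq_true, PySem.List.mem_pyRange_one, beq_iff_eq]
  constructor
  · intro h c hc
    obtain ⟨hc1, hc2⟩ := hc
    have hcnt : (seg.countP (fun x => x == p)) = seg.length := by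
      have hle := List.countP_le_length (l := seg) (p := fun x => x == p)
      omega
    have hall := (List.countP_eq_length (p := fun x => x == p) (l := seg)).1 hcnt
    obtain ⟨k, rfl⟩ : ∃ k : Nat, c = (k : Int) :=
      ⟨c.toNat, (Int.toNat_of_nonneg (le_trans (Int.natCast_nonneg i) hc1)).symm⟩
    have hki : i ≤ k := by exact_mod_cast hc1
    have hkj : k < j := by exact_mod_cast hc2
    have hkx : k < xs.length := lt_of_lt_of_le hkj hjl
    rw [PySem.List.pyGetD_eq_getElem xs 0 (Int.natCast_nonneg k) (by exact_mod_cast hkx)]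
    have hm : k - i < seg.length := by omega
    have := hall (seg[k - i]) (List.getElem_mem hm)
    rw [hget (k - i) hm] at this
    simp only [beq_iff_eq] at this
    have hk' : i + (k - i) = k := by omega
    simp only [Int.toNat_natCast]
    rw [show xs[k] = xs[i + (k-i)]'(by omega) from by congr 1; omega]
    exact this
  · intro h
    have hcnt : (seg.countP (fun x => x == p)) = seg.length := by
      apply List.countP_eq_length.2
      intro x hx
      obtain ⟨m, hm, rfl⟩ := List.mem_iff_getElem.1 hx
      rw [hget m hm]
      have hb1 : (i : Int) ≤ ((i + m : Nat) : Int) := by push_cast; omega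
      have hb2 : ((i + m : Nat) : Int) < (j : Int) := by push_cast; omega
      have := h ((i + m : Nat) : Int) ⟨hb1, hb2⟩
      rw [PySem.List.pyGetD_eq_getElem xs 0 (Int.natCast_nonneg _) (by exact_mod_cast (by omega : i + m < xs.length))] at this
      simpa using this
    omega

theorem pvRowSeg (board : List (List Int)) (p : Int)
    (hpre : ∀ row ∈ board, (PySem.List.pyGetD board 0 []).length ≤ row.length)
    (r a b : Int) (hr0 : 0 ≤ r) (hrR : r < (board.length : Int))
    (ha : 0 ≤ a) (hab : a ≤ b) (hb : b ≤ ((PySem.List.pyGetD board 0 []).length : Int)) :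
    pvSegOk (PySem.List.pyGetD (board.map (pvPrefix p 0)) r []) a b
      = (PySem.List.pyRange a b 1).all
          (fun c => PySem.List.pyGetD (PySem.List.pyGetD board r []) c 0 == p) := by
  have hlen : r < ((board.map (pvPrefix p 0)).length : Int) := by simpa using hrR
  rw [PySem.List.pyGetD_eq_getElem _ [] hr0 hlen, List.getElem_map]
  have hrn : r.toNat < board.length := by omega
  have hmem : board[r.toNat] ∈ board := List.getElem_mem hrn
  rw [pvSegOk_eq p board[r.toNat] a b ha hab
    (le_trans hb (by exact_mod_cast hpre _ hmem))]
  apply pvAllCongr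
  intro x hx
  obtain ⟨hx1, hx2⟩ := PySem.List.mem_pyRange_one.mp hx
  rw [PySem.List.pyGetD_eq_getElem board [] hr0 hrR]

theorem pvColSeg (board : List (List Int)) (p : Int)
    (c a b : Int) (hc0 : 0 ≤ c) (hcC : c < ((PySem.List.pyGetD board 0 []).length : Int))
    (ha : 0 ≤ a) (hab : a ≤ b) (hb : b ≤ (board.length : Int)) :
    pvSegOk (PySem.List.pyGetD
        ((PySem.List.pyRange 0 ((PySem.List.pyGetD board 0 []).length : Int) 1).map (fun c =>
          pvPrefix p 0 ((PySem.List.pyRange 0 (board.length : Int) 1).map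
            (fun r => PySem.List.pyGetD (PySem.List.pyGetD board r []) c 0)))) c []) a b
      = (PySem.List.pyRange a b 1).all
          (fun r => PySem.List.pyGetD (PySem.List.pyGetD board r []) c 0 == p) := by
  rw [PySem.List.pyGetD_map_pyRange_of_nonneg _ _ _ _ hc0 hcC]
  have hlen : ((PySem.List.pyRange 0 (board.length : Int) 1).map
      (fun r => PySem.List.pyGetD (PySem.List.pyGetD board r []) c 0)).length = board.length := by
    simp [PySem.List.length_pyRange_one]
  rw [pvSegOk_eq p _ a b ha hab (by rw [hlen]; exact hb)]
  apply pvAllCongr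
  intro r hr
  obtain ⟨hr1, hr2⟩ := PySem.List.mem_pyRange_one.mp hr
  rw [PySem.List.pyGetD_map_pyRange_of_nonneg _ _ _ _ (le_trans ha hr1) (by omega)]

theorem pvCheck_eq (board : List (List Int)) (position : Int × Int) (p fr fc w h : Int)
    (hpre : ∀ row ∈ board, (PySem.List.pyGetD board 0 []).length ≤ row.length)
    (hfr : -1 ≤ fr) (hfc : -1 ≤ fc)
    (hh3 : 3 ≤ h) (hhR : h ≤ (board.length : Int) - fr)
    (hw3 : 3 ≤ w) (hwC : w ≤ ((PySem.List.pyGetD board 0 []).length : Int) - fc) :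
    (pvInArea position fr fc w h && pvSurrounded board position p fr fc w h)
      = pvCheckB (board.map (pvPrefix p 0))
          ((PySem.List.pyRange 0 ((PySem.List.pyGetD board 0 []).length : Int) 1).map (fun c =>
            pvPrefix p 0 ((PySem.List.pyRange 0 (board.length : Int) 1).map
              (fun r => PySem.List.pyGetD (PySem.List.pyGetD board r []) c 0))))
          position.1 position.2 fr fc w h := by
  have Etop : (decide (fr < 0) || pvSegOk (PySem.List.pyGetD (board.map (pvPrefix p 0)) fr []) (fc+1) (fc+w-1))
      = ((if fr ≥ 0 then (PySem.List.pyRange (fc+1) (fc+w-1) 1).map (fun c => (fr, c)) else []).all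
          (fun q => PySem.List.pyGetD (PySem.List.pyGetD board q.1 []) q.2 0 == p)) := by
    by_cases g : 0 ≤ fr
    · rw [if_pos g, List.all_map,
        pvRowSeg board p hpre fr (fc+1) (fc+w-1) g (by omega) (by omega) (by omega) (by omega)]
      simp [show ¬(fr < 0) by omega]
      rfl
    · rw [if_neg g]
      simp [show fr < 0 by omega]
  have Ebot : (decide (fr + h - 1 > 2) || pvSegOk (PySem.List.pyGetD (board.map (pvPrefix p 0)) (fr+h-1) []) (fc+1) (fc+w-1))
      = ((if fr + h - 1 ≤ 2 then (PySem.List.pyRange (fc+1) (fc+w-1) 1).map (fun c => (fr+h-1, c)) else []).all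
          (fun q => PySem.List.pyGetD (PySem.List.pyGetD board q.1 []) q.2 0 == p)) := by
    by_cases g : fr + h - 1 ≤ 2
    · rw [if_pos g, List.all_map,
        pvRowSeg board p hpre (fr+h-1) (fc+1) (fc+w-1) (by omega) (by omega) (by omega) (by omega) (by omega)]
      simp [show ¬(fr + h - 1 > 2) by omega]
      rfl
    · rw [if_neg g]
      simp [show fr + h - 1 > 2 by omega]
  have Eright : (decide (fc + w - 1 > 2) || pvSegOk (PySem.List.pyGetD
        ((PySem.List.pyRange 0 ((PySem.List.pyGetD board 0 []).length : Int) 1).map (fun c =>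
          pvPrefix p 0 ((PySem.List.pyRange 0 (board.length : Int) 1).map
            (fun r => PySem.List.pyGetD (PySem.List.pyGetD board r []) c 0)))) (fc+w-1) []) (fr+1) (fr+h-1))
      = ((if fc + w - 1 ≤ 2 then (PySem.List.pyRange (fr+1) (fr+h-1) 1).map (fun r => (r, fc+w-1)) else []).all
          (fun q => PySem.List.pyGetD (PySem.List.pyGetD board q.1 []) q.2 0 == p)) := by
    by_cases g : fc + w - 1 ≤ 2
    · rw [if_pos g, List.all_map,
        pvColSeg board p (fc+w-1) (fr+1) (fr+h-1) (by omega) (by omega) (by omega) (by omega) (by omega)]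
      simp [show ¬(fc + w - 1 > 2) by omega]
      rfl
    · rw [if_neg g]
      simp [show fc + w - 1 > 2 by omega]
  have Eleft : (decide (fc < 0) || pvSegOk (PySem.List.pyGetD
        ((PySem.List.pyRange 0 ((PySem.List.pyGetD board 0 []).length : Int) 1).map (fun c =>
          pvPrefix p 0 ((PySem.List.pyRange 0 (board.length : Int) 1).map
            (fun r => PySem.List.pyGetD (PySem.List.pyGetD board r []) c 0)))) fc []) (fr+1) (fr+h-1))
      = ((if fc ≥ 0 then (PySem.List.pyRange (fr+1) (fr+h-1) 1).map (fun r => (r, fc)) else []).all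
          (fun q => PySem.List.pyGetD (PySem.List.pyGetD board q.1 []) q.2 0 == p)) := by
    by_cases g : 0 ≤ fc
    · rw [if_pos g, List.all_map,
        pvColSeg board p fc (fr+1) (fr+h-1) g (by omega) (by omega) (by omega) (by omega)]
      simp [show ¬(fc < 0) by omega]
      rfl
    · rw [if_neg g]
      simp [show fc < 0 by omega]
  simp only [pvInArea, pvSurrounded, pvCheckB]
  rw [Etop, Ebot, Eright, Eleft]
  by_cases hI : (fr < position.1 ∧ position.1 < fr + h - 1) ∧ (fc < position.2 ∧ position.2 < fc + w - 1)
  · rw [Bool.eq_iff_iff]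
    simp only [hI.1, hI.2, decide_true, Bool.and_self, Bool.not_true,
      Bool.false_eq_true, if_false, List.all_append, Bool.and_eq_true, decide_eq_true_eq,
      and_true]
    tauto
  · rw [Bool.eq_iff_iff]
    constructor
    · intro hx
      simp only [Bool.and_eq_true, decide_eq_true_eq] at hx
      exfalso
      rcases hx with ⟨_, hs⟩
      by_cases h1 : (fr < position.1 ∧ position.1 < fr + h - 1)
      · by_cases h2 : (fc < position.2 ∧ position.2 < fc + w - 1)
        · exact hI ⟨h1, h2⟩
        · simp [h1, h2] at hs
      · simp [h1] at hs
    · intro hx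
      simp only [Bool.and_eq_true, decide_eq_true_eq] at hx
      exact absurd (by tauto : (fr < position.1 ∧ position.1 < fr + h - 1) ∧ (fc < position.2 ∧ position.2 < fc + w - 1)) hI

-- ===== VERDICT (by name: the statement is the Claim_ definition above) =====
theorem determine_surrounded_by_by_move_spec : Claim_equal_determine_surrounded_by_by_move := by
  intro board position move hdom hpre
  unfold Spec_determine_surrounded_by_by_move
  obtain ⟨-, hpre2⟩ := hpre
  unfold determine_surrounded_by_by_move determine_surrounded_by_by_move_alt
  dsimp only
  congr 1
  funext player
  dsimp only
  apply PySem.List.any_congr_mem; intro fr hfr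
  apply PySem.List.any_congr_mem; intro fc hfc
  apply PySem.List.any_congr_mem; intro h hh
  apply PySem.List.any_congr_mem; intro w hw
  obtain ⟨hfr1, hfr2⟩ := PySem.List.mem_pyRange_one.mp hfr
  obtain ⟨hfc1, hfc2⟩ := PySem.List.mem_pyRange_one.mp hfc
  obtain ⟨hh1, hh2⟩ := PySem.List.mem_pyRange_one.mp hh
  obtain ⟨hw1, hw2⟩ := PySem.List.mem_pyRange_one.mp hw
  exact pvCheck_eq board position player fr fc w h hpre2 hfr1 hfc1 hh1 (by omega) hw1 (by omega)
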